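-- pv_equiv track=rewrite | github.com/zzhang2293/coding_note | template/manachar.py | build
-- ===== SOURCE A (Python) =====
-- def build(lst: str) -> list:
--     n = len(lst) * 2 + 1
--     arr = []
--     j = 0
--     for i in range(n):
--         if i & 1 == 0:
--             arr.append('#')
--         else:
--             arr.append(lst[j])
--             j += 1
--     return arr
-- ===== SOURCE B (Python) =====
-- def build(lst: str) -> list:
--     arr = ['#'] * (len(lst) * 2 + 1)
--     arr[1::2] = lst
--     return arr
-- ===== Notes on version B (the rewrite author's own statement) =====
-- stated objective: idiomatic
-- what changed: B preallocates the full array of 2n+1 hash marks and then places the characters into the odd positions with one slice assignment arr[1::2] = lst, instead of A's element-by-element loop over range(2n+1) with a parity branch and a manual second index.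
import Mathlib
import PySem

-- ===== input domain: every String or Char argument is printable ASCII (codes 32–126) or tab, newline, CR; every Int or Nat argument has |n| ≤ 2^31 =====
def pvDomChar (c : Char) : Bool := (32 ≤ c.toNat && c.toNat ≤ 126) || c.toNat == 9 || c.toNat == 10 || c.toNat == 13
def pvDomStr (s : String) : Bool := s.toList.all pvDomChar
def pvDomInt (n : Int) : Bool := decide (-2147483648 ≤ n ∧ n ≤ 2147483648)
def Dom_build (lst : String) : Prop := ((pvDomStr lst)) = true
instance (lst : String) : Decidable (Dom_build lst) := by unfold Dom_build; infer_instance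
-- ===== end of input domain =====

-- B preallocates a 2n+1 array of "#" and writes the characters into the odd slots by one
-- slice assignment, replacing A's index loop with parity branch: idiomatic, same cost.


-- ===== PORT A =====
-- one loop step of A: state is (arr, j); the 'none' branch of lst[j] is unreachable
-- (j stays below len(lst) whenever i is odd), so A never raises.
def buildStep (lst : String) (st : List String × Int) (i : Int) : List String × Int :=
  if i % 2 == 0 then (st.1 ++ ["#"], st.2)
  else (st.1 ++ [(match PySem.Str.pyGet? lst st.2 with
                  | some c => String.mk [c]
                  | none => "")], st.2 + 1)

def build (lst : String) : List String :=
  -- n = len(lst) * 2 + 1, inlined into the range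
  ((PySem.List.pyRange 0 (PySem.Str.len lst * 2 + 1) 1).foldl (buildStep lst) ([], 0)).1

-- ===== PORT B =====
-- hand port of CPython's extended slice assignment arr[1::2] = lst for the equal-length
-- case (here len(arr) = 2*len(lst)+1, so the lengths always match): keep one element,
-- overwrite the next, repeat; exact on every input B reaches.
def sliceAssignOdd : List String → List Char → List String
  | x :: _ :: rest, c :: cs => x :: String.mk [c] :: sliceAssignOdd rest cs
  | xs, _ => xs

def build_alt (lst : String) : List String :=
  sliceAssignOdd (List.replicate (lst.toList.length * 2 + 1) "#") lst.toList

-- ===== PRECONDITION & SPEC =====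
def Spec_build (lst : String) (out : List String) : Prop := out = build_alt lst
instance (lst : String) (out : List String) : Decidable (Spec_build lst out) := by unfold Spec_build; infer_instance

-- ===== CLAIM (what is proved, stated in full; the proofs are below) =====
def Claim_equal_build : Prop := ∀ (lst : String), Dom_build lst → Spec_build lst (build lst)

-- ===== LEMMAS AND PROOFS =====

-- loop invariant for A: after the first 2k+1 iterations the accumulator is the
-- interleaving of the first k characters (with a leading '#') and j = k
theorem build_loop (lst : String) (k : Nat) (hk : k ≤ lst.toList.length) :
    (PySem.List.pyRange 0 (2 * (k : Int) + 1) 1).foldl (buildStep lst) ([], 0)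
      = ("#" :: (lst.toList.take k).flatMap (fun c => [String.mk [c], "#"]), (k : Int)) := by
  induction k with
  | zero =>
    rw [show 2 * ((0 : Nat) : Int) + 1 = 0 + 1 by norm_num, PySem.List.pyRange_one_singleton]
    simp [buildStep]
  | succ k ih =>
    have hsplit : PySem.List.pyRange 0 (2 * ((k + 1 : Nat) : Int) + 1) 1
        = PySem.List.pyRange 0 (2 * (k : Int) + 1) 1 ++ [2 * (k : Int) + 1, 2 * (k : Int) + 2] := by
      rw [PySem.List.pyRange_one_append 0 (2 * (k : Int) + 1) (2 * ((k + 1 : Nat) : Int) + 1)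
        (by positivity) (by push_cast; omega)]
      congr 1
      rw [PySem.List.pyRange_one_cons (by push_cast; omega)]
      rw [show (2 * (k : Int) + 1 + 1) = 2 * (k : Int) + 2 by ring]
      rw [PySem.List.pyRange_one_cons (by push_cast; omega)]
      rw [PySem.List.pyRange_one_eq_nil (by push_cast; omega)]
    rw [hsplit, List.foldl_append, ih (Nat.le_of_succ_le hk)]
    have h1 : (2 * (k : Int) + 1) % 2 = 1 := by omega
    have h2 : (2 * (k : Int) + 2) % 2 = 0 := by omega
    have hkc : lst.toList[k]? = some lst.toList[k] := List.getElem?_eq_getElem (by omega)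
    simp only [List.foldl_cons, List.foldl_nil, buildStep, h1, h2,
      PySem.Str.pyGet?_natCast, hkc]
    have htake : List.take (k + 1) lst.toList = List.take k lst.toList ++ [lst.toList[k]] := by
      rw [List.take_succ, hkc]; rfl
    rw [htake, List.flatMap_append]
    simp

-- B's slice assignment into the all-hash array yields the same interleaving
theorem sliceAssign_replicate (cs : List Char) :
    sliceAssignOdd (List.replicate (cs.length * 2 + 1) "#") cs
      = "#" :: cs.flatMap (fun c => [String.mk [c], "#"]) := by
  induction cs with
  | nil => rfl
  | cons c cs ih =>
    have : (c :: cs).length * 2 + 1 = ((cs.length * 2 + 1) + 1) + 1 := by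
      simp [List.length_cons]; ring
    rw [this, List.replicate_succ, List.replicate_succ, sliceAssignOdd, ih]
    simp

-- ===== VERDICT (by name: the statement is the Claim_ definition above) =====
theorem build_spec : Claim_equal_build := by
  intro lst _
  unfold Spec_build build build_alt
  have hlen : PySem.Str.len lst = (lst.toList.length : Int) := by
    simp [PySem.Str.len_eq]
  rw [hlen, show ((lst.toList.length : Int) * 2 + 1) = 2 * (lst.toList.length : Int) + 1 by ring]
  rw [build_loop lst lst.toList.length le_rfl, sliceAssign_replicate]
  simp [List.take_of_length_le]
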